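-- pv_equiv track=rewrite | github.com/maletsden/meshpress | encoder/implementation/quantization.py | calculate_remapping
-- ===== SOURCE A (Python) =====
-- from collections import defaultdict, Counter
--
-- def calculate_remapping(strip, codes):
--     # Step 1: Count the frequency of each integer in the array
--     frequency = Counter(strip)
--
--     # Step 2: Sort integers by frequency in descending order
--     sorted_by_frequency = sorted(frequency.keys(), key=lambda x: -frequency[x])
--
--     # Step 3: Sort codes by length in ascending order
--     sorted_codes = {i: code for i, code in enumerate(codes)}
--     sorted_codes = sorted(sorted_codes.items(), key=lambda item: len(item[1]))
--     sorted_code_keys = [key for key, _ in sorted_codes]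
--
--     # Step 4: Create a remap dictionary by mapping each integer to the shortest available code
--     indices_remap = {original: new for original, new in zip(sorted_by_frequency, sorted_code_keys)}
--
--     return indices_remap
-- ===== SOURCE B (Python) =====
-- def calculate_remapping(strip, codes):
--     # Count frequencies with one dict pass.
--     freq = {}
--     for x in strip:
--         freq[x] = freq.get(x, 0) + 1
--
--     # Bucket values by frequency (insertion order preserved inside a bucket),
--     # then read buckets from the highest frequency down: a counting sort that
--     # reproduces the stable descending-frequency order without comparisons.
--     n = len(strip)
--     fbuckets = {}
--     for v, f in freq.items():
--         fbuckets.setdefault(f, []).append(v)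
--     order_vals = []
--     for f in reversed(range(1, n + 1)):
--         order_vals += fbuckets.get(f, [])
--
--     # Bucket code indices by code length, read in ascending length order:
--     # a counting sort reproducing the stable ascending-by-length order.
--     maxlen = 0
--     for c in codes:
--         maxlen = max(maxlen, len(c))
--     lbuckets = {}
--     for i, c in enumerate(codes):
--         lbuckets.setdefault(len(c), []).append(i)
--     order_idx = []
--     for l in range(0, maxlen + 1):
--         order_idx += lbuckets.get(l, [])
--
--     return dict(zip(order_vals, order_idx))
-- ===== Notes on version B (the rewrite author's own statement) =====
-- stated objective: alternative
-- what changed: Both comparison sorts are replaced by counting/bucket sorts: values are bucketed by frequency and read from the highest frequency down, code indices are bucketed by length and read in ascending length order, reproducing the stable sort orders without comparisons.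
import Mathlib
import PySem

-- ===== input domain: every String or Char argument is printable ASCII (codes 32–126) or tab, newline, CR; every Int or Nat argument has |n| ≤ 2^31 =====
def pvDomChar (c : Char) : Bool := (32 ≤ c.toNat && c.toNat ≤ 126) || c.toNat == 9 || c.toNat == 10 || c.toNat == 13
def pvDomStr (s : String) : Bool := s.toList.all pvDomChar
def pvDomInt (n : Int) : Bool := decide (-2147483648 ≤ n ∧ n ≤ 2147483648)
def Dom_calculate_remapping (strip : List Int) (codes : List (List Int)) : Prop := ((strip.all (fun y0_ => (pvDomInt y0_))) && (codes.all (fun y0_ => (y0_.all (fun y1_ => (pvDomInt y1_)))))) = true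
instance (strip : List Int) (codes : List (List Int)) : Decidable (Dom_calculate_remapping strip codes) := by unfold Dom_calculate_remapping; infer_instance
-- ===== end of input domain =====

-- B replaces both stable comparison sorts by counting/bucket sorts (same result, different decomposition).

-- ===== PORT A =====
def calculate_remapping (strip : List Int) (codes : List (List Int)) : List (Int × Int) :=
  -- frequency = Counter(strip)
  let frequency : PySem.Dict Int Int := PySem.Dict.counter strip
  -- sorted_by_frequency = sorted(frequency.keys(), key=lambda x: -frequency[x])
  let sorted_by_frequency : List Int :=
    PySem.List.sorted frequency.keys (fun x => -(frequency.getD x 0)) false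
  -- sorted_codes = {i: code for i, code in enumerate(codes)}
  let sorted_codes : PySem.Dict Int (List Int) := PySem.Dict.ofList (PySem.List.enumerate codes)
  -- sorted_codes = sorted(sorted_codes.items(), key=lambda item: len(item[1]))
  let sorted_codes' : List (Int × List Int) :=
    PySem.List.sorted sorted_codes.items (fun item => (item.2.length : Int)) false
  -- sorted_code_keys = [key for key, _ in sorted_codes]
  let sorted_code_keys : List Int := sorted_codes'.map (fun p => p.1)
  -- indices_remap = {original: new for original, new in zip(sorted_by_frequency, sorted_code_keys)}
  (PySem.Dict.ofList (List.zip sorted_by_frequency sorted_code_keys)).items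

-- ===== PORT B =====
def calculate_remapping_alt (strip : List Int) (codes : List (List Int)) : List (Int × Int) :=
  -- freq[x] = freq.get(x, 0) + 1
  let freq : PySem.Dict Int Int :=
    strip.foldl (fun d x => d.insert x (d.getD x 0 + 1)) PySem.Dict.empty
  let n : Int := strip.length
  -- fbuckets.setdefault(f, []).append(v)  for (v, f) in freq.items()
  let fbuckets : PySem.Dict Int (List Int) :=
    freq.items.foldl (fun d it => d.modify it.2 [] (fun l => l ++ [it.1])) PySem.Dict.empty
  -- for f in reversed(range(1, n+1)): order_vals += fbuckets.get(f, [])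
  let order_vals : List Int :=
    ((PySem.List.pyRange 1 (n + 1) 1).reverse).foldl (fun acc f => acc ++ fbuckets.getD f []) []
  -- maxlen = max(maxlen, len(c)) over codes
  let maxlen : Int := codes.foldl (fun m c => max m ((c.length : Int))) 0
  -- lbuckets.setdefault(len(c), []).append(i)  for (i, c) in enumerate(codes)
  let lbuckets : PySem.Dict Int (List Int) :=
    (PySem.List.enumerate codes).foldl
      (fun d it => d.modify ((it.2.length : Int)) [] (fun l => l ++ [it.1])) PySem.Dict.empty
  -- for l in range(0, maxlen+1): order_idx += lbuckets.get(l, [])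
  let order_idx : List Int :=
    (PySem.List.pyRange 0 (maxlen + 1) 1).foldl (fun acc l => acc ++ lbuckets.getD l []) []
  -- return dict(zip(order_vals, order_idx))
  (PySem.Dict.ofList (List.zip order_vals order_idx)).items

-- ===== PRECONDITION & SPEC =====
def Spec_calculate_remapping (strip : List Int) (codes : List (List Int)) (out : List (Int × Int)) : Prop := out = calculate_remapping_alt strip codes
instance (strip : List Int) (codes : List (List Int)) (out : List (Int × Int)) : Decidable (Spec_calculate_remapping strip codes out) := by unfold Spec_calculate_remapping; infer_instance

-- ===== CLAIM (what is proved, stated in full; the proofs are below) =====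
def Claim_equal_calculate_remapping : Prop := ∀ (strip : List Int) (codes : List (List Int)), Dom_calculate_remapping strip codes → Spec_calculate_remapping strip codes (calculate_remapping strip codes)

-- ===== LEMMAS AND PROOFS =====

-- inserting past a prefix none of whose elements x goes before
theorem insertBy_append_of_not_before {α : Type} (before : α → α → Bool) (x : α) (l r : List α)
    (h : ∀ y ∈ l, before x y = false) :
    PySem.List.insertBy before x (l ++ r) = l ++ PySem.List.insertBy before x r := by
  induction l with
  | nil => simp
  | cons a t ih =>
    simp only [List.cons_append, PySem.List.insertBy, h a (by simp)]
    simp only [Bool.false_eq_true, if_false]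
    rw [ih (fun y hy => h y (by simp [hy]))]

theorem insertBy_of_forall_before {α : Type} (before : α → α → Bool) (x : α) (r : List α)
    (h : ∀ y ∈ r, before x y = true) :
    PySem.List.insertBy before x r = x :: r := by
  cases r with
  | nil => rfl
  | cons a t => simp [PySem.List.insertBy, h a (by simp)]

-- inserting an element into a concatenation of key-homogeneous buckets listed in strictly
-- increasing key order appends it to its own bucket
theorem insertBy_flatMap {α : Type} (key : α → Int) (x : α) (ks : List Int) (g : Int → List α)
    (hg : ∀ k ∈ ks, ∀ y ∈ g k, key y = k)
    (hks : ks.Pairwise (· < ·)) (hx : key x ∈ ks) :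
    PySem.List.insertBy (fun a b => decide (key a < key b)) x (ks.flatMap g)
      = ks.flatMap (fun k => if k = key x then g k ++ [x] else g k) := by
  induction ks with
  | nil => cases hx
  | cons k ks ih =>
    have hhead : ∀ k' ∈ ks, k < k' := (List.pairwise_cons.mp hks).1
    by_cases hk : k = key x
    · have hskip : ∀ y ∈ g k, (fun a b => decide (key a < key b)) x y = false := by
        intro y hy
        have := hg k (by simp) y hy
        simp [this, hk]
      have hrest : ∀ y ∈ ks.flatMap g, (fun a b => decide (key a < key b)) x y = true := by
        intro y hy
        rcases List.mem_flatMap.mp hy with ⟨k', hk', hy'⟩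
        have hkey := hg k' (by simp [hk']) y hy'
        have := hhead k' hk'
        simp [hkey, ← hk]
        omega
      rw [List.flatMap_cons, insertBy_append_of_not_before _ _ _ _ hskip,
        insertBy_of_forall_before _ _ _ hrest]
      have : ks.flatMap (fun k' => if k' = key x then g k' ++ [x] else g k') = ks.flatMap g := by
        apply List.flatMap_congr
        intro k' hk'
        have := hhead k' hk'
        have : k' ≠ key x := by omega
        simp [this]
      simp [List.flatMap_cons, this, hk]
    · have hxks : key x ∈ ks := by
        rcases hx with _ | h
        · exact absurd rfl hk
        · assumption
      have hklt : k < key x := hhead _ hxks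
      have hskip : ∀ y ∈ g k, (fun a b => decide (key a < key b)) x y = false := by
        intro y hy
        have := hg k (by simp) y hy
        simp [this]
        omega
      rw [List.flatMap_cons, insertBy_append_of_not_before _ _ _ _ hskip,
        ih (fun k' hk' y hy => hg k' (by simp [hk']) y hy) (List.pairwise_cons.mp hks).2 hxks]
      simp [List.flatMap_cons, hk]

-- Python's stable sort as a concatenation of key buckets over any strictly increasing
-- covering key list
theorem sorted_eq_flatMap_filter {α : Type} (key : α → Int) (ks : List Int)
    (hks : ks.Pairwise (· < ·)) :
    ∀ xs : List α, (∀ y ∈ xs, key y ∈ ks) →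
    PySem.List.sorted xs key false = ks.flatMap (fun k => xs.filter (fun y => key y == k)) := by
  intro xs
  induction xs using List.reverseRecOn with
  | nil => intro _; simp [PySem.List.sorted]
  | append_singleton xs x ih =>
    intro hcov
    rw [PySem.List.sorted_eq_foldl_insertBy, List.foldl_append, List.foldl_cons, List.foldl_nil,
      ← PySem.List.sorted_eq_foldl_insertBy,
      ih (fun y hy => hcov y (by simp [hy])),
      insertBy_flatMap key x ks _ (fun k _ y hy => by
        have := List.of_mem_filter hy
        exact (beq_iff_eq).mp this) hks (hcov x (by simp))]
    apply List.flatMap_congr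
    intro k _
    by_cases h : k = key x <;> simp [h, Ne.symm, List.filter_append]

-- the bucket-building loop: the bucket at f holds, in order, the values of the elements
-- whose key is f
theorem getD_foldl_modify_append {α β : Type} (keyf : α → Int) (valf : α → β) :
    ∀ (l : List α) (f : Int),
    ((l.foldl (fun d e => d.modify (keyf e) [] (fun t => t ++ [valf e])) PySem.Dict.empty).getD f [])
      = (l.filter (fun e => keyf e == f)).map valf := by
  intro l
  induction l using List.reverseRecOn with
  | nil => intro f; simp [PySem.Dict.getD, PySem.Dict.get?, PySem.Dict.empty]
  | append_singleton l e ih =>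
    intro f
    rw [List.foldl_append, List.foldl_cons, List.foldl_nil, PySem.Dict.modify,
      PySem.Dict.getD_insert]
    by_cases h : f = keyf e
    · simp [h, ih, List.filter_append]
    · have h' : ¬ (keyf e == f) = true := by simp [Ne.symm h]
      simp [h, ih, List.filter_append, h']

-- keys of enumerate are strictly increasing (hence nodup)
theorem enumerate_fst_ge {α : Type} : ∀ (xs : List α) (s : Int),
    ∀ p ∈ PySem.List.enumerate xs s, s ≤ p.1 := by
  intro xs
  induction xs with
  | nil => intro s p hp; simp [PySem.List.enumerate] at hp
  | cons x t ih =>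
    intro s p hp
    simp only [PySem.List.enumerate, List.mem_cons] at hp
    rcases hp with hp | hp
    · simp [hp]
    · have := ih (s + 1) p hp
      omega

theorem enumerate_fst_pairwise {α : Type} : ∀ (xs : List α) (s : Int),
    (PySem.List.enumerate xs s).Pairwise (fun p q => p.1 < q.1) := by
  intro xs
  induction xs with
  | nil => intro s; simp [PySem.List.enumerate]
  | cons x t ih =>
    intro s
    refine List.pairwise_cons.mpr ⟨?_, ih (s + 1)⟩
    intro p hp
    have := enumerate_fst_ge t (s + 1) p hp
    simp
    omega

theorem enumerate_snd_mem {α : Type} : ∀ (xs : List α) (s : Int),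
    ∀ p ∈ PySem.List.enumerate xs s, p.2 ∈ xs := by
  intro xs
  induction xs with
  | nil => intro s p hp; simp [PySem.List.enumerate] at hp
  | cons x t ih =>
    intro s p hp
    simp only [PySem.List.enumerate, List.mem_cons] at hp
    rcases hp with hp | hp
    · simp [hp]
    · exact List.mem_cons_of_mem _ (ih (s + 1) p hp)

-- building a dict from pairs with fresh, pairwise distinct keys just appends the pairs
theorem update_items_of_fresh {κ ν : Type} [BEq κ] [LawfulBEq κ] :
    ∀ (ps : List (κ × ν)) (d : PySem.Dict κ ν),
    (∀ p ∈ ps, d.contains p.1 = false) → (ps.map Prod.fst).Nodup →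
    (d.update ps).items = d.items ++ ps := by
  intro ps
  induction ps with
  | nil => intro d _ _; simp [PySem.Dict.update]
  | cons p t ih =>
    intro d hfresh hnodup
    have h1 : d.contains p.1 = false := hfresh p (by simp)
    have hins : (d.insert p.1 p.2).items = d.items ++ [p] := by
      simp [PySem.Dict.insert, h1]
    have hfresh' : ∀ q ∈ t, (d.insert p.1 p.2).contains q.1 = false := by
      intro q hq
      have hne : q.1 ≠ p.1 := by
        intro he
        have : p.1 ∈ t.map Prod.fst := List.mem_map.mpr ⟨q, hq, he⟩
        exact (List.nodup_cons.mp (by simpa using hnodup)).1 this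
      simp only [PySem.Dict.contains, hins, List.any_append, Bool.or_eq_false_iff]
      constructor
      · simpa [PySem.Dict.contains] using hfresh q (List.mem_cons_of_mem _ hq)
      · simp [Ne.symm hne]
    have := ih (d.insert p.1 p.2) hfresh' (by simpa using (List.nodup_cons.mp (by simpa using hnodup)).2)
    simp only [PySem.Dict.update, List.foldl_cons] at this ⊢
    rw [this, hins]
    simp

theorem ofList_items_of_nodup {κ ν : Type} [BEq κ] [LawfulBEq κ] (ps : List (κ × ν))
    (hnodup : (ps.map Prod.fst).Nodup) :
    (PySem.Dict.ofList ps).items = ps := by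
  rw [PySem.Dict.ofList, update_items_of_fresh ps PySem.Dict.empty
    (fun p _ => by simp [PySem.Dict.contains, PySem.Dict.empty]) hnodup]
  simp [PySem.Dict.empty]

-- strictly increasing range with step 1
theorem pyRange_one_pairwise (a b : Int) :
    (PySem.List.pyRange a b 1).Pairwise (· < ·) := by
  rw [PySem.List.pyRange_of_pos a b (by norm_num)]
  rw [List.pairwise_map]
  apply List.Pairwise.imp _ List.pairwise_lt_range
  intro m n h
  omega

-- the descending-frequency read in B equals A's stable sort of the counter keys
theorem vals_eq (strip : List Int) :
    PySem.List.sorted (PySem.Dict.counter strip).keys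
        (fun x => -((PySem.Dict.counter strip).getD x 0)) false
      = ((PySem.List.pyRange 1 ((strip.length : Int) + 1) 1).reverse).flatMap
          (fun f => ((PySem.Dict.counter strip).items.foldl
            (fun d it => d.modify it.2 [] (fun l => l ++ [it.1])) PySem.Dict.empty).getD f []) := by
  have hkey : (fun x => -((PySem.Dict.counter strip).getD x 0)) =
      (fun x : Int => -((strip.count x : Int))) := by
    funext x; rw [PySem.Dict.getD_counter]
  rw [hkey, PySem.Dict.keys_counter]
  set R := (PySem.List.pyRange 1 ((strip.length : Int) + 1) 1).reverse with hR
  have hpair : (R.map (fun f => -f)).Pairwise (· < ·) := by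
    rw [List.pairwise_map, hR, List.pairwise_reverse]
    apply List.Pairwise.imp _ (pyRange_one_pairwise 1 ((strip.length : Int) + 1))
    intro a b h
    omega
  have hcov : ∀ y ∈ PySem.Set.ofList strip, (fun x : Int => -((strip.count x : Int))) y ∈
      R.map (fun f => -f) := by
    intro y hy
    have hmem : y ∈ strip := (PySem.Set.mem_ofList strip y).mp hy
    refine List.mem_map.mpr ⟨(strip.count y : Int), ?_, rfl⟩
    rw [hR, List.mem_reverse, PySem.List.mem_pyRange_iff_of_pos (by norm_num)]
    have h1 : 0 < strip.count y := List.count_pos_iff.mpr hmem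
    have h2 : strip.count y ≤ strip.length := List.count_le_length
    refine ⟨by exact_mod_cast h1, by omega, by simp⟩
  rw [sorted_eq_flatMap_filter _ _ hpair _ hcov, List.flatMap_map]
  apply List.flatMap_congr
  intro f _
  rw [getD_foldl_modify_append (fun it : Int × Int => it.2) (fun it => it.1),
    PySem.Dict.items_counter, List.filter_map]
  have : ((fun e : Int × Int => e.2 == f) ∘ fun k : Int => (k, (strip.count k : Int))) =
      (fun k : Int => ((strip.count k : Int)) == f) := rfl
  rw [this, List.map_map]
  have hfil : (fun y : Int => (-(strip.count y : Int) == -f)) =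
      (fun y : Int => ((strip.count y : Int) == f)) := by
    funext y
    by_cases h : (strip.count y : Int) = f <;> simp [h]
  rw [hfil]
  exact (List.map_id'' (fun _ => rfl) _).symm

-- the ascending-length read in B equals A's stable sort of the enumerated codes
theorem idx_eq (codes : List (List Int)) :
    (PySem.List.sorted (PySem.Dict.ofList (PySem.List.enumerate codes)).items
        (fun item => ((item.2.length : Int))) false).map (fun p => p.1)
      = (PySem.List.pyRange 0 ((codes.foldl (fun m c => max m ((c.length : Int))) 0) + 1) 1).flatMap
          (fun l => ((PySem.List.enumerate codes).foldl
            (fun d it => d.modify ((it.2.length : Int)) [] (fun t => t ++ [it.1]))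
            PySem.Dict.empty).getD l []) := by
  rw [ofList_items_of_nodup _ (List.pairwise_map.mpr
    (((enumerate_fst_pairwise codes 0)).imp fun h => ne_of_lt h))]
  have hcov : ∀ p ∈ PySem.List.enumerate codes 0,
      ((p.2.length : Int)) ∈ PySem.List.pyRange 0
        ((codes.foldl (fun m c => max m ((c.length : Int))) 0) + 1) 1 := by
    intro p hp
    rw [PySem.List.mem_pyRange_iff_of_pos (by norm_num)]
    have hmem := enumerate_snd_mem codes 0 p hp
    have := (PySem.List.le_foldl_max_int codes (fun c => (c.length : Int)) 0).2 p.2 hmem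
    refine ⟨by positivity, by omega, by simp⟩
  rw [sorted_eq_flatMap_filter _ _ (pyRange_one_pairwise _ _) _ hcov, List.map_flatMap]
  apply List.flatMap_congr
  intro l _
  rw [getD_foldl_modify_append (fun it : Int × List Int => ((it.2.length : Int))) (fun it => it.1)]

-- ===== VERDICT (by name: the statement is the Claim_ definition above) =====
theorem calculate_remapping_spec : Claim_equal_calculate_remapping := by
  intro strip codes _
  show calculate_remapping strip codes = calculate_remapping_alt strip codes
  rw [calculate_remapping, calculate_remapping_alt]
  simp only [PySem.Dict.foldl_insert_getD_add_one_eq_counter,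
    PySem.List.foldl_append_eq_flatMap, List.nil_append]
  rw [vals_eq, idx_eq]
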